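-- pv_equiv track=rewrite | github.com/MrChepe09/Competitive-Programming-Codes | CodeForces Round #642 (Div 3)/board_moves.py | boardmoves
-- ===== SOURCE A (Python) =====
-- def boardmoves(n):
--   start = n//2
--   count = 0
--   while(n!=1):
--     count += ((n-1)*4)*start
--     start-=1
--     n-=2
--   return count
-- ===== SOURCE B (Python) =====
-- def boardmoves(n):
--   m = (n - 1) // 2
--   return 4 * m * (m + 1) * (2 * m + 1) // 3
-- ===== Notes on version B (the rewrite author's own statement) =====
-- stated objective: faster
-- what changed: Replaced the layer-by-layer while loop with the closed-form sum of squares 8*sum_{j=1..m} j^2 = 4*m*(m+1)*(2*m+1)/3 where m = (n-1)//2.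
import Mathlib
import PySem

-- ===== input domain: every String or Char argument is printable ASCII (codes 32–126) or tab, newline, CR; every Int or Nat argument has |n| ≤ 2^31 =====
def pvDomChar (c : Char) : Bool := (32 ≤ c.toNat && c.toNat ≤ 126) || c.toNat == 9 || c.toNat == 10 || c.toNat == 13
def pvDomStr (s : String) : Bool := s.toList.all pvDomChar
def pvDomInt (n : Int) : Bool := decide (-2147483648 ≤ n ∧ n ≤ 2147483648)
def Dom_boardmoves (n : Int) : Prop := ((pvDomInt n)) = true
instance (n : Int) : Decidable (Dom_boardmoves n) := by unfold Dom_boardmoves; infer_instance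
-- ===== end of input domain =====

-- B replaces A's layer-by-layer loop with the closed-form sum of squares 4*m*(m+1)*(2*m+1)//3, m=(n-1)//2 (faster).


-- ===== PORT A =====
-- fuel-based transcription of A's while loop (fuel n.toNat suffices on Pre_);
-- state (n, start, count) updated exactly as in the Python body
def boardmovesLoop : Nat → Int → Int → Int → Int
  | 0, _, _, count => count
  | fuel + 1, n, start, count =>
    if n = 1 then count
    else boardmovesLoop fuel (n - 2) (start - 1) (count + ((n - 1) * 4) * start)

def boardmoves (n : Int) : Int :=
  boardmovesLoop n.toNat n (PySem.Int.floordiv n 2) 0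

-- ===== PORT B =====
def boardmoves_alt (n : Int) : Int :=
  let m := PySem.Int.floordiv (n - 1) 2
  PySem.Int.floordiv (4 * m * (m + 1) * (2 * m + 1)) 3

-- ===== PRECONDITION & SPEC =====
-- Pre_ excludes even and non-positive n, on which A's while loop never reaches n == 1 and diverges.
def Pre_boardmoves (n : Int) : Prop := 1 ≤ n ∧ n % 2 = 1
instance (n : Int) : Decidable (Pre_boardmoves n) := by unfold Pre_boardmoves; infer_instance
def pvWitness_boardmoves : Int := (5)
def Spec_boardmoves (n : Int) (out : Int) : Prop := out = boardmoves_alt n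
instance (n : Int) (out : Int) : Decidable (Spec_boardmoves n out) := by unfold Spec_boardmoves; infer_instance

-- ===== CLAIM (what is proved, stated in full; the proofs are below) =====
def Claim_equal_boardmoves : Prop := ∀ (n : Int), Dom_boardmoves n → Pre_boardmoves n → Spec_boardmoves n (boardmoves n)

-- ===== LEMMAS AND PROOFS =====
-- partial sums of squares: sqsum m = Σ_{j=1}^m j²
def sqsum : Nat → Int
  | 0 => 0
  | m + 1 => sqsum m + ((m : Int) + 1) ^ 2

theorem six_mul_sq (m : Nat) : 6 * sqsum m = (m : Int) * (m + 1) * (2 * m + 1) := by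
  induction m with
  | zero => simp [sqsum]
  | succ k ih => push_cast [sqsum]; push_cast at ih; ring_nf; ring_nf at ih; linarith

theorem loop_eq (m : Nat) : ∀ (fuel : Nat) (c : Int), m < fuel →
    boardmovesLoop fuel (2 * (m : Int) + 1) (m : Int) c = c + 8 * sqsum m := by
  induction m with
  | zero =>
    intro fuel c h
    match fuel, h with
    | f + 1, _ => simp [boardmovesLoop, sqsum]
  | succ k ih =>
    intro fuel c h
    match fuel, h with
    | f + 1, h =>
      have h1 : (2 * (((k:Nat) + 1 : Nat) : Int) + 1) - 2 = 2 * (k : Int) + 1 := by push_cast; ring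
      have h2 : (((k:Nat) + 1 : Nat) : Int) - 1 = (k : Int) := by push_cast; ring
      rw [boardmovesLoop]
      push_cast
      rw [if_neg (by omega)]
      have := ih f (c + (2 * ((k : Int) + 1) + 1 - 1) * 4 * ((k : Int) + 1)) (by omega)
      rw [show (2:Int) * ((k:Int)+1) + 1 - 2 = 2 * (k:Int) + 1 by ring,
          show ((k:Int)+1) - 1 = (k:Int) by ring, this, sqsum]
      ring

theorem boardmoves_spec : Claim_equal_boardmoves := by
  intro n _ hpre
  obtain ⟨h1, h2⟩ := hpre
  obtain ⟨m, hm⟩ : ∃ m : Nat, n = 2 * (m : Int) + 1 := ⟨((n - 1) / 2).toNat, by omega⟩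
  subst hm
  unfold Spec_boardmoves boardmoves boardmoves_alt
  have hfd : PySem.Int.floordiv (2 * (m : Int) + 1) 2 = (m : Int) := by
    rw [PySem.Int.floordiv_eq_ediv_of_pos (by omega)]; omega
  have hfd2 : PySem.Int.floordiv (2 * (m : Int) + 1 - 1) 2 = (m : Int) := by
    rw [PySem.Int.floordiv_eq_ediv_of_pos (by omega)]; omega
  have htn : (2 * (m : Int) + 1).toNat = 2 * m + 1 := by omega
  rw [hfd, hfd2, htn, loop_eq m (2 * m + 1) 0 (by omega)]
  have h6 := six_mul_sq m
  have : 4 * (m : Int) * ((m : Int) + 1) * (2 * (m : Int) + 1) = (8 * sqsum m) * 3 := by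
    linarith
  simp only []
  rw [this, PySem.Int.floordiv_eq_ediv_of_pos (by omega), Int.mul_ediv_cancel _ (by omega)]
  ring
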